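-- pv_equiv track=rewrite | github.com/undisputeDD/IR | DIndex_CIndex/src/search.py | cprocess
-- ===== SOURCE A (Python) =====
-- def cprocess(sp_query):
--     res = []
--     counter = 0
--     for i in range(len(sp_query)):
--         elem = sp_query[i]
--         if elem != 'AND' and elem != 'OR' and elem != 'NOT' and elem != '(' and elem != ')' and elem[0] != '\\':
--             counter += 1
--         else:
--             counter = 0
--         if counter == 2:
--             res.append('\\1')
--             counter = 1
--         res.append(elem)
--
--     return res
-- ===== SOURCE B (Python) =====
-- def cprocess(sp_query):
--     ops = ('AND', 'OR', 'NOT', '(', ')')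
--
--     def is_op(e):
--         return e in ops or e[0] == '\\'
--
--     out = []
--     i = 0
--     n = len(sp_query)
--     while i < n:
--         if is_op(sp_query[i]):
--             out.append(sp_query[i])
--             i += 1
--         else:
--             # scan the whole maximal run of plain terms, then join it with '\1'
--             j = i + 1
--             while j < n and not is_op(sp_query[j]):
--                 j += 1
--             run = sp_query[i:j]
--             out.append(run[0])
--             for t in run[1:]:
--                 out.append('\\1')
--                 out.append(t)
--             i = j
--     return out
-- ===== Notes on version B (the rewrite author's own statement) =====
-- stated objective: alternative
-- what changed: Replaces A's per-element running-counter state machine with a run-based grouping: an outer loop over maximal runs of plain terms, each run scanned by an inner loop and then emitted joined with '\1' separators, operators copied through.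
-- outside the precondition, e.g. on cprocess(['a', '']): A raises IndexError, B raises IndexError
import Mathlib
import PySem

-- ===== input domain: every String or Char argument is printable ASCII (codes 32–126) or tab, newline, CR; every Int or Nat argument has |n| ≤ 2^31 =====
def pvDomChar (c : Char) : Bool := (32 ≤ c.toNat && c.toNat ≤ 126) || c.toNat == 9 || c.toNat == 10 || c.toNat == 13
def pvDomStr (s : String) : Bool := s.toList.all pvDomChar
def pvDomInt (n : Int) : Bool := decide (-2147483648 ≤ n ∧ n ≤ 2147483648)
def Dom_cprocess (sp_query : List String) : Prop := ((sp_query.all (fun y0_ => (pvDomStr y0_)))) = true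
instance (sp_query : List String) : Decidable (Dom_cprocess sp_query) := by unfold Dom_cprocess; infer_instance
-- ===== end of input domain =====

-- B replaces A's running-counter state machine with run-based grouping: maximal runs of
-- plain terms are scanned and emitted joined with '\1'; return values proved equal.

-- ===== PORT A =====
-- the chained '!=' test of A's if (elem[0] via pyGet?, none = IndexError on "")
def condA (elem : String) : Bool :=
  elem != "AND" && elem != "OR" && elem != "NOT" && elem != "(" && elem != ")" &&
    (PySem.Str.pyGet? elem 0 != some '\\')

def stepA (st : List String × Int) (elem : String) : List String × Int :=
  let counter : Int := if condA elem then st.2 + 1 else 0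
  if counter == 2 then (st.1 ++ ["\\1"] ++ [elem], 1)
  else (st.1 ++ [elem], counter)

def cprocess (sp_query : List String) : List String :=
  (sp_query.foldl stepA ([], 0)).1

-- ===== PORT B =====
-- Source B's is_op: 'e in ops or e[0] == '\\''
def isOpB (e : String) : Bool :=
  ["AND", "OR", "NOT", "(", ")"].contains e || (PySem.Str.pyGet? e 0 == some '\\')

-- Source B's outer while loop; the inner scanning while loop is the span (takeWhile/dropWhile)
-- over the remainder, the run's tail is emitted as '\1'-joined pairs
def goB : List String → List String
  | [] => []
  | e :: rest =>
      if isOpB e then e :: goB rest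
      else
        let s := rest.span (fun x => !isOpB x)
        (e :: s.1.flatMap (fun t => ["\\1", t])) ++ goB s.2
termination_by l => l.length
decreasing_by
  · simp
  · simp only [List.span_eq_takeWhile_dropWhile]
    have := List.length_dropWhile_le (fun x => !isOpB x) rest
    simp; omega

def cprocess_alt (sp_query : List String) : List String := goB sp_query

-- ===== PRECONDITION & SPEC =====
-- Pre_ excludes lists containing the empty-string token, on which Python A (and B) raises IndexError at e[0].
def Pre_cprocess (sp_query : List String) : Prop := ∀ e ∈ sp_query, e ≠ ""
instance (sp_query : List String) : Decidable (Pre_cprocess sp_query) := by unfold Pre_cprocess; infer_instance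
def pvWitness_cprocess : List String := ["a", "b", "AND", "(", "c", "\\w", "d", ")"]

def Spec_cprocess (sp_query : List String) (out : List String) : Prop := out = cprocess_alt sp_query
instance (sp_query : List String) (out : List String) : Decidable (Spec_cprocess sp_query out) := by unfold Spec_cprocess; infer_instance

-- ===== CLAIM (what is proved, stated in full; the proofs are below) =====
def Claim_equal_cprocess : Prop := ∀ (sp_query : List String), Dom_cprocess sp_query → Pre_cprocess sp_query → Spec_cprocess sp_query (cprocess sp_query)

-- ===== LEMMAS AND PROOFS =====

-- common recursive shape of both outputs: prev = was the previous element a plain term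
def goSpec : List String → Bool → List String
  | [], _ => []
  | e :: rest, prev =>
      (if !isOpB e && prev then ["\\1", e] else [e]) ++ goSpec rest (!isOpB e)

theorem condA_eq (e : String) : condA e = !isOpB e := by
  simp only [condA, isOpB, List.contains_cons, List.contains_nil, Bool.or_false,
    Bool.not_or, bne]
  ac_rfl

theorem foldA_ih_true (rest : List String)
    (ih : ∀ (res : List String) (prev : Bool),
      (rest.foldl stepA (res, if prev then (1 : Int) else 0)).1 = res ++ goSpec rest prev) :
    ∀ r, (rest.foldl stepA (r, (1 : Int))).1 = r ++ goSpec rest true := by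
  intro r; have := ih r true; simpa using this

theorem foldA_ih_false (rest : List String)
    (ih : ∀ (res : List String) (prev : Bool),
      (rest.foldl stepA (res, if prev then (1 : Int) else 0)).1 = res ++ goSpec rest prev) :
    ∀ r, (rest.foldl stepA (r, (0 : Int))).1 = r ++ goSpec rest false := by
  intro r; have := ih r false; simpa using this

theorem foldA_eq_goSpec (l : List String) (res : List String) (prev : Bool) :
    (l.foldl stepA (res, if prev then (1 : Int) else 0)).1 = res ++ goSpec l prev := by
  induction l generalizing res prev with
  | nil => simp [goSpec]
  | cons e rest ih =>
      have ih1 := foldA_ih_true rest ih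
      have ih0 := foldA_ih_false rest ih
      cases prev <;> cases ht : isOpB e <;>
        simp [List.foldl_cons, stepA, condA_eq, ht, goSpec, ih1, ih0]

-- goSpec with prev = true is the '\1'-joined run tail followed by the rest restarted
theorem goSpec_true (l : List String) :
    goSpec l true =
      (l.takeWhile (fun x => !isOpB x)).flatMap (fun t => ["\\1", t]) ++
        goSpec (l.dropWhile (fun x => !isOpB x)) false := by
  induction l with
  | nil => simp [goSpec]
  | cons e rest ih =>
      cases ht : isOpB e <;>
        simp [goSpec, ht, ih]

theorem goB_eq_goSpec (l : List String) : goB l = goSpec l false := by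
  induction hn : l.length using Nat.strong_induction_on generalizing l with
  | _ n ih =>
    match l with
    | [] => simp [goB, goSpec]
    | e :: rest =>
        cases ht : isOpB e with
        | true =>
            have := ih rest.length (by simp [← hn]) rest rfl
            simp [goB, goSpec, ht, this]
        | false =>
            have hlen : (rest.dropWhile (fun x => !isOpB x)).length < n := by
              have := List.length_dropWhile_le (fun x => !isOpB x) rest
              simp [← hn]; omega
            have := ih _ hlen (rest.dropWhile (fun x => !isOpB x)) rfl
            simp [goB, goSpec, ht, List.span_eq_takeWhile_dropWhile, goSpec_true, this]

-- ===== VERDICT (by name: the statement is the Claim_ definition above) =====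
theorem cprocess_spec : Claim_equal_cprocess := by
  intro sp_query _ _
  show cprocess sp_query = cprocess_alt sp_query
  have hA := foldA_eq_goSpec sp_query [] false
  simp only [if_false, Bool.false_eq_true] at hA
  simp [cprocess, cprocess_alt, hA, goB_eq_goSpec]
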